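-- pv_equiv track=rewrite | github.com/serVmik/gendiff | gendiff/gendiff_module.py | create_lst_of_actions
-- ===== SOURCE A (Python) =====
-- def create_lst_of_actions(dct_from_file1, dct_from_file2):
--     lst_of_actions_for_dct_key = sorted(list(
--         set(dct_from_file1.keys()).union(dct_from_file2.keys())
--     ))
--
--     for index, key in enumerate(lst_of_actions_for_dct_key):
--         if dct_from_file1.get(key) == dct_from_file2.get(key):
--             lst_of_actions_for_dct_key[index] = (key, 'equal')
--         elif key in dct_from_file1 and key in dct_from_file2:
--             lst_of_actions_for_dct_key[index] = (key, 'changed')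
--         elif key in dct_from_file1:
--             lst_of_actions_for_dct_key[index] = (key, 'removed')
--         else:
--             lst_of_actions_for_dct_key[index] = (key, 'added')
--
--     return lst_of_actions_for_dct_key
-- ===== SOURCE B (Python) =====
-- def create_lst_of_actions(dct_from_file1, dct_from_file2):
--     keys1 = set(dct_from_file1)
--     keys2 = set(dct_from_file2)
--     all_keys = keys1 | keys2
--     equal = {k for k in all_keys
--              if dct_from_file1.get(k) == dct_from_file2.get(k)}
--     changed = (keys1 & keys2) - equal
--     removed = (keys1 - keys2) - equal
--     added = (keys2 - keys1) - equal
--     label = {}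
--     for k in equal:
--         label[k] = 'equal'
--     for k in changed:
--         label[k] = 'changed'
--     for k in removed:
--         label[k] = 'removed'
--     for k in added:
--         label[k] = 'added'
--     return sorted(((k, label[k]) for k in all_keys), key=lambda pair: pair[0])
-- ===== Notes on version B (the rewrite author's own statement) =====
-- stated objective: alternative
-- what changed: Replaces A's per-key 4-way branching pass over the sorted key list by set-algebra partitions (equal/changed/removed/added) computed up front, a label table built from them, and a single sort of the labelled pairs by key.
import Mathlib
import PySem

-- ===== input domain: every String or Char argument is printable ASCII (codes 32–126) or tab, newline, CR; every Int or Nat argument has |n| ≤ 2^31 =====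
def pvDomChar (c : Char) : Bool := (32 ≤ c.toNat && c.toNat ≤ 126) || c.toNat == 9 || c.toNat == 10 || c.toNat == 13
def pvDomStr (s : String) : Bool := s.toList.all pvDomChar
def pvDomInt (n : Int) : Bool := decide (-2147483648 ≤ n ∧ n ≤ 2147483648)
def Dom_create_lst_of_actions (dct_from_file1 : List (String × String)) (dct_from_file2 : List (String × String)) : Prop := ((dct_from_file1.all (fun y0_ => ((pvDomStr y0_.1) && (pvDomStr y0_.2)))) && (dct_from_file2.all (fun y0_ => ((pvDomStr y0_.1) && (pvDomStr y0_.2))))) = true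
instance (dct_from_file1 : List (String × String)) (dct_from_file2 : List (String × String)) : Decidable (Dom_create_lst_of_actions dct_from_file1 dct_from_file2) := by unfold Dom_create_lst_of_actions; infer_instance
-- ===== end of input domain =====

-- B replaces A's per-key 4-way branching loop by set-algebra partitions (equal/changed/removed/added),
-- a label table built from them, and one sort of the labelled pairs (objective: alternative, same cost).

-- ===== PORT A =====
-- A's in-place per-index tuple assignment over the sorted key list writes each slot exactly once
-- from its own key, so it is ported as a map over the sorted key list (same branches, same order).
def create_lst_of_actions (dct_from_file1 : List (String × String)) (dct_from_file2 : List (String × String)) : List (String × String) :=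
  let lst_of_actions_for_dct_key :=
    PySem.List.sorted
      (PySem.Set.union (PySem.Set.ofList (dct_from_file1.map Prod.fst)) (dct_from_file2.map Prod.fst))
      (fun x => x) false
  lst_of_actions_for_dct_key.map (fun key =>
    if (PySem.Dict.mk dct_from_file1).get? key == (PySem.Dict.mk dct_from_file2).get? key then
      (key, "equal")
    else if (PySem.Dict.mk dct_from_file1).contains key && (PySem.Dict.mk dct_from_file2).contains key then
      (key, "changed")
    else if (PySem.Dict.mk dct_from_file1).contains key then
      (key, "removed")
    else
      (key, "added"))

-- ===== PORT B =====
-- label[k] in Source B never raises (every key of all_keys is in one of the four sets);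
-- it is ported as getD with an unreachable default "".
def create_lst_of_actions_alt (dct_from_file1 : List (String × String)) (dct_from_file2 : List (String × String)) : List (String × String) :=
  let keys1 := PySem.Set.ofList (dct_from_file1.map Prod.fst)
  let keys2 := PySem.Set.ofList (dct_from_file2.map Prod.fst)
  let all_keys := PySem.Set.union keys1 keys2
  let equal := all_keys.filter (fun k =>
    (PySem.Dict.mk dct_from_file1).get? k == (PySem.Dict.mk dct_from_file2).get? k)
  let changed := PySem.Set.diff (PySem.Set.inter keys1 keys2) equal
  let removed := PySem.Set.diff (PySem.Set.diff keys1 keys2) equal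
  let added := PySem.Set.diff (PySem.Set.diff keys2 keys1) equal
  let label :=
    added.foldl (fun d k => d.insert k "added")
      (removed.foldl (fun d k => d.insert k "removed")
        (changed.foldl (fun d k => d.insert k "changed")
          (equal.foldl (fun d k => d.insert k "equal") PySem.Dict.empty)))
  PySem.List.sorted (all_keys.map (fun k => (k, label.getD k ""))) (fun pair => pair.1) false

-- ===== PRECONDITION & SPEC =====
def Spec_create_lst_of_actions (dct_from_file1 : List (String × String)) (dct_from_file2 : List (String × String)) (out : List (String × String)) : Prop := out = create_lst_of_actions_alt dct_from_file1 dct_from_file2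
instance (dct_from_file1 : List (String × String)) (dct_from_file2 : List (String × String)) (out : List (String × String)) : Decidable (Spec_create_lst_of_actions dct_from_file1 dct_from_file2 out) := by unfold Spec_create_lst_of_actions; infer_instance

-- ===== CLAIM (what is proved, stated in full; the proofs are below) =====
def Claim_equal_create_lst_of_actions : Prop := ∀ (dct_from_file1 : List (String × String)) (dct_from_file2 : List (String × String)), Dom_create_lst_of_actions dct_from_file1 dct_from_file2 → Spec_create_lst_of_actions dct_from_file1 dct_from_file2 (create_lst_of_actions dct_from_file1 dct_from_file2)

-- ===== LEMMAS AND PROOFS =====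

-- the per-key classification both programs compute
def pvTag (d1 d2 : List (String × String)) (k : String) : String :=
  if (PySem.Dict.mk d1).get? k == (PySem.Dict.mk d2).get? k then "equal"
  else if (PySem.Dict.mk d1).contains k && (PySem.Dict.mk d2).contains k then "changed"
  else if (PySem.Dict.mk d1).contains k then "removed"
  else "added"

theorem pv_foldl_insert_getD (l : List String) (d : PySem.Dict String String) (v x : String) :
    (l.foldl (fun d k => d.insert k v) d).getD x "" = if x ∈ l then v else d.getD x "" := by
  induction l generalizing d with
  | nil => simp
  | cons a t ih =>
    simp only [List.foldl_cons, ih]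
    by_cases hx : x ∈ t
    · simp [hx]
    · by_cases hax : x = a
      · subst hax; simp [hx, PySem.Dict.getD_insert_self]
      · simp [hx, hax, PySem.Dict.getD_insert_of_ne _ _ _ hax]

theorem pv_contains_mk (l : List (String × String)) (x : String) :
    (PySem.Dict.mk l).contains x = true ↔ x ∈ l.map Prod.fst := by
  show (l.any fun p => p.1 == x) = true ↔ _
  simp only [List.any_eq_true, beq_iff_eq, List.mem_map]

theorem pv_union_ofList_right (s : PySem.Set String) (t : List String) :
    PySem.Set.union s (PySem.Set.ofList t) = PySem.Set.union s t := by
  induction t using List.reverseRecOn with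
  | nil => rfl
  | append_singleton t x ih =>
    show PySem.Set.update s (PySem.Set.ofList (t ++ [x])) = PySem.Set.update s (t ++ [x])
    rw [PySem.Set.ofList_append_singleton]
    by_cases hx : x ∈ t
    · rw [PySem.Set.add_of_mem ((PySem.Set.mem_ofList t x).2 hx)]
      calc PySem.Set.update s (PySem.Set.ofList t) = PySem.Set.update s t := ih
        _ = PySem.Set.update s (t ++ [x]) := by
            rw [PySem.Set.update_append]
            simp only [PySem.Set.update_cons, PySem.Set.update_nil]
            rw [PySem.Set.add_of_mem ((PySem.Set.mem_update s t x).2 (Or.inr hx))]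
    · rw [PySem.Set.add_of_not_mem (fun hh => hx ((PySem.Set.mem_ofList t x).1 hh))]
      rw [PySem.Set.update_append, PySem.Set.update_append]
      simp only [PySem.Set.update_cons, PySem.Set.update_nil]
      exact congrArg (fun u => PySem.Set.add u x) ih

-- B's label table agrees with the per-key classification on every key of the union
theorem pv_label_eq_tag (d1 d2 : List (String × String)) (k : String)
    (hk : k ∈ PySem.Set.union (PySem.Set.ofList (d1.map Prod.fst)) (PySem.Set.ofList (d2.map Prod.fst))) :
    (let keys1 := PySem.Set.ofList (d1.map Prod.fst)
     let keys2 := PySem.Set.ofList (d2.map Prod.fst)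
     let all_keys := PySem.Set.union keys1 keys2
     let equal := all_keys.filter (fun k =>
       (PySem.Dict.mk d1).get? k == (PySem.Dict.mk d2).get? k)
     let changed := PySem.Set.diff (PySem.Set.inter keys1 keys2) equal
     let removed := PySem.Set.diff (PySem.Set.diff keys1 keys2) equal
     let added := PySem.Set.diff (PySem.Set.diff keys2 keys1) equal
     (added.foldl (fun d k => d.insert k "added")
       (removed.foldl (fun d k => d.insert k "removed")
         (changed.foldl (fun d k => d.insert k "changed")
           (equal.foldl (fun d k => d.insert k "equal") PySem.Dict.empty)))).getD k "")
    = pvTag d1 d2 k := by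
  simp only [pv_foldl_insert_getD, pvTag]
  rw [PySem.Set.mem_union] at hk
  simp only [PySem.Set.mem_ofList] at hk
  by_cases hc : ((PySem.Dict.mk d1).get? k == (PySem.Dict.mk d2).get? k) = true
  · have hkeq : k ∈ (PySem.Set.union (PySem.Set.ofList (d1.map Prod.fst))
        (PySem.Set.ofList (d2.map Prod.fst))).filter (fun k =>
        (PySem.Dict.mk d1).get? k == (PySem.Dict.mk d2).get? k) := by
      rw [List.mem_filter]
      refine ⟨?_, hc⟩
      rw [PySem.Set.mem_union]
      simpa [PySem.Set.mem_ofList] using hk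
    have h1 : ∀ s, k ∉ PySem.Set.diff s ((PySem.Set.union (PySem.Set.ofList (d1.map Prod.fst))
        (PySem.Set.ofList (d2.map Prod.fst))).filter (fun k =>
        (PySem.Dict.mk d1).get? k == (PySem.Dict.mk d2).get? k)) := by
      intro s hmem
      exact ((PySem.Set.mem_diff _ _ _).1 hmem).2 hkeq
    simp [h1, hkeq, hc]
  · have hkneq : k ∉ (PySem.Set.union (PySem.Set.ofList (d1.map Prod.fst))
        (PySem.Set.ofList (d2.map Prod.fst))).filter (fun k =>
        (PySem.Dict.mk d1).get? k == (PySem.Dict.mk d2).get? k) := by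
      rw [List.mem_filter]; rintro ⟨-, h⟩; exact hc h
    have ha1 : (d1.any fun p => p.1 == k) = true ↔ k ∈ d1.map Prod.fst := pv_contains_mk d1 k
    have ha2 : (d2.any fun p => p.1 == k) = true ↔ k ∈ d2.map Prod.fst := pv_contains_mk d2 k
    by_cases h1 : k ∈ d1.map Prod.fst <;> by_cases h2 : k ∈ d2.map Prod.fst
    · -- changed
      simp [PySem.Set.mem_diff, PySem.Set.mem_inter, PySem.Set.mem_ofList, hkneq, hc,
        h1, h2, ha1.2 h1, ha2.2 h2]
    · -- removed
      have hb2 : (d2.any fun p => p.1 == k) = false := by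
        rw [Bool.eq_false_iff]; exact fun hh => h2 (ha2.1 hh)
      simp [PySem.Set.mem_diff, PySem.Set.mem_ofList, hkneq, hc,
        h1, h2, ha1.2 h1, hb2]
    · -- added
      have hb1 : (d1.any fun p => p.1 == k) = false := by
        rw [Bool.eq_false_iff]; exact fun hh => h1 (ha1.1 hh)
      simp [PySem.Set.mem_diff, PySem.Set.mem_ofList, hkneq, hc,
        h1, h2, hb1, ha2.2 h2]
    · exact absurd hk (by simp [h1, h2])

theorem pv_main (d1 d2 : List (String × String)) :
    create_lst_of_actions d1 d2 = create_lst_of_actions_alt d1 d2 := by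
  have hu : PySem.Set.union (PySem.Set.ofList (d1.map Prod.fst)) (d2.map Prod.fst)
      = PySem.Set.union (PySem.Set.ofList (d1.map Prod.fst)) (PySem.Set.ofList (d2.map Prod.fst)) :=
    (pv_union_ofList_right _ _).symm
  have hA : create_lst_of_actions d1 d2
      = (PySem.List.sorted
          (PySem.Set.union (PySem.Set.ofList (d1.map Prod.fst)) (PySem.Set.ofList (d2.map Prod.fst)))
          (fun x => x) false).map (fun k => (k, pvTag d1 d2 k)) := by
    unfold create_lst_of_actions
    rw [hu]
    refine List.map_congr_left ?_
    intro k _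
    unfold pvTag
    split_ifs <;> rfl
  have hunion : PySem.Set.union (PySem.Set.ofList (d1.map Prod.fst)) (PySem.Set.ofList (d2.map Prod.fst))
      = PySem.Set.ofList (d1.map Prod.fst ++ d2.map Prod.fst) := by
    rw [pv_union_ofList_right]
    exact (PySem.Set.ofList_append _ _).symm
  have hpair : List.Pairwise (fun a b : String × String => a.1 < b.1)
      ((PySem.List.sorted
        (PySem.Set.union (PySem.Set.ofList (d1.map Prod.fst)) (PySem.Set.ofList (d2.map Prod.fst)))
        (fun x => x) false).map (fun k => (k, pvTag d1 d2 k))) := by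
    rw [List.pairwise_map]
    rw [hunion]
    exact PySem.List.sorted_ofList_pairwise_lt _
  have hperm : ((PySem.List.sorted
        (PySem.Set.union (PySem.Set.ofList (d1.map Prod.fst)) (PySem.Set.ofList (d2.map Prod.fst)))
        (fun x => x) false).map (fun k => (k, pvTag d1 d2 k))).Perm
      ((PySem.Set.union (PySem.Set.ofList (d1.map Prod.fst)) (PySem.Set.ofList (d2.map Prod.fst))).map
        (fun k => (k, pvTag d1 d2 k))) :=
    (PySem.List.sorted_perm _ _ _).map _
  have hB : create_lst_of_actions_alt d1 d2
      = PySem.List.sorted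
          ((PySem.Set.union (PySem.Set.ofList (d1.map Prod.fst)) (PySem.Set.ofList (d2.map Prod.fst))).map
            (fun k => (k, pvTag d1 d2 k)))
          (fun pair => pair.1) false := by
    unfold create_lst_of_actions_alt
    dsimp only
    congr 1
    refine List.map_congr_left ?_
    intro k hk
    exact congrArg (fun s => (k, s)) (pv_label_eq_tag d1 d2 k hk)
  rw [hA, hB,
    PySem.List.sorted_eq_of_perm_of_pairwise_lt _ _ (fun pair : String × String => pair.1)
      hperm (by simpa using hpair)]

-- ===== VERDICT (by name: the statement is the Claim_ definition above) =====
theorem create_lst_of_actions_spec : Claim_equal_create_lst_of_actions := by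
  intro d1 d2 _
  exact pv_main d1 d2
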